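-- pv_equiv track=rewrite | github.com/JosefAf/MAS25_BattleSnakes | BaseSnakeAI.py | calculateMoveScore
-- ===== SOURCE A (Python) =====
-- DIRECTIONS = {
--     'up': (0, 1),
--     'down': (0, -1),
--     'left': (-1, 0),
--     'right': (1, 0),
-- }
--
-- def calculateMoveScore(my_head_pos, potential_moves, closest_food_pos, board):
--     """Calculate score for each potential move and return the move with the lowest score,
--     according to the heuristic described in the move() function."""
--
--     move_scores = {}  #Dict of moves and their scores
--
--     for direction in potential_moves:
--         #Calculate manhattan distance to nearest food
--         potential_pos = (my_head_pos[0] + DIRECTIONS[direction][0],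
--                          my_head_pos[1] + DIRECTIONS[direction][1])
--         distance_to_closest_food = manhattanDistance(potential_pos,
--                                                      closest_food_pos)
--         #Use flood fill to count the number of free reachable cells from new position TODO TODO TODO TODO
--         move_scores[
--             direction] = distance_to_closest_food * 5  #Add directions as keys and their scores as values
--
--     #LINE BELOW WOULD BE NICE IF IT WORKED MY DAWG
--     #next_move = max(move_scores.keys(), key = move_scores.get) #Get key with lowest value in dict
--
--     #Get move with lowest score
--     next_move = "up"
--     for key in move_scores:
--         if move_scores[key] == min(move_scores.values()):
--             next_move = key
--
--     return next_move
--
-- def manhattanDistance(a, b):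
--     return abs(a[0] - b[0]) + abs(a[1] - b[1])
-- ===== SOURCE B (Python) =====
-- DIRECTIONS = {
--     'up': (0, 1),
--     'down': (0, -1),
--     'left': (-1, 0),
--     'right': (1, 0),
-- }
--
-- def calculateMoveScore(my_head_pos, potential_moves, closest_food_pos, board):
--     """Single pass: keep the best (lowest) score seen so far; '<=' makes a later
--     tied move win, matching the dict-based last-minimum selection, and 'up' is
--     the answer when there are no moves.  Duplicates are collapsed first, as a
--     dict keyed by direction would."""
--     best_move, best_score = "up", None
--     for direction in dict.fromkeys(potential_moves):
--         dx, dy = DIRECTIONS[direction]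
--         score = 5 * (abs(my_head_pos[0] + dx - closest_food_pos[0])
--                      + abs(my_head_pos[1] + dy - closest_food_pos[1]))
--         if best_score is None or score <= best_score:
--             best_move, best_score = direction, score
--     return best_move
-- ===== Notes on version B (the rewrite author's own statement) =====
-- stated objective: simpler
-- what changed: Replaces the build-a-score-dict pass plus the second scan that recomputes min(values) at every key with a single running-best fold over the deduplicated moves ('<=' keeps the last tied move, 'up' is the empty default).
import Mathlib
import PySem

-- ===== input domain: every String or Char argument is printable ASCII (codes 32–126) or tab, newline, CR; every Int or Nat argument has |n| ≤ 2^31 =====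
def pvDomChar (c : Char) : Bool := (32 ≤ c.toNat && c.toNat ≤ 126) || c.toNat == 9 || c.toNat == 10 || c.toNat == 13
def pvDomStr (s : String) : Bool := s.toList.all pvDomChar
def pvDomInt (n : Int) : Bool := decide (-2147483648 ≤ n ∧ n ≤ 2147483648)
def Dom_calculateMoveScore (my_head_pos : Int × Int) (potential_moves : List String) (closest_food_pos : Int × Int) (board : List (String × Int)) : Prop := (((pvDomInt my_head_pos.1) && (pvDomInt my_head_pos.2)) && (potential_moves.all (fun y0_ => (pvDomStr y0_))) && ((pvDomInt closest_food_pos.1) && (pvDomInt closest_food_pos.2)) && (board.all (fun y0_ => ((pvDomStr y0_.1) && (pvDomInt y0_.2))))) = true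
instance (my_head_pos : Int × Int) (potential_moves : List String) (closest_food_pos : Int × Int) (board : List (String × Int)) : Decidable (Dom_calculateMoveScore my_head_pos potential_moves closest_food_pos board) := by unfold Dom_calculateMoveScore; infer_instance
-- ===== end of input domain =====

-- B replaces A's score-dict plus a second min-scan with one running-best fold; objective: simpler.

-- ===== PORT A =====
-- the module constant DIRECTIONS
def pyDIRECTIONS : PySem.Dict String (Int × Int) :=
  PySem.Dict.ofList [("up", (0, 1)), ("down", (0, -1)), ("left", (-1, 0)), ("right", (1, 0))]

def pyManhattan (a b : Int × Int) : Int := |a.1 - b.1| + |a.2 - b.2|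

def calculateMoveScore (my_head_pos : Int × Int) (potential_moves : List String) (closest_food_pos : Int × Int) (board : List (String × Int)) : String :=
  -- for direction in potential_moves: move_scores[direction] = manhattanDistance(pos, food) * 5
  let move_scores : PySem.Dict String Int :=
    potential_moves.foldl (fun d direction =>
      -- DIRECTIONS[direction]: KeyError (= the .getD (0,0) default) excluded by Pre_
      let dv := (pyDIRECTIONS.get? direction).getD (0, 0)
      let potential_pos := (my_head_pos.1 + dv.1, my_head_pos.2 + dv.2)
      let distance_to_closest_food := pyManhattan potential_pos closest_food_pos
      d.insert direction (distance_to_closest_food * 5)) PySem.Dict.empty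
  -- for key in move_scores: if move_scores[key] == min(move_scores.values()): next_move = key
  -- (the .getD 0 defaults are unreachable: key ∈ keys, and values ≠ [] whenever the loop body runs)
  move_scores.keys.foldl (fun next_move key =>
    if move_scores.getD key 0 = (PySem.List.min? move_scores.values (fun v => v)).getD 0 then key
    else next_move) "up"

-- ===== PORT B =====
def calculateMoveScore_alt (my_head_pos : Int × Int) (potential_moves : List String) (closest_food_pos : Int × Int) (board : List (String × Int)) : String :=
  -- single pass over dict.fromkeys(potential_moves) keeping the best (<=) score so far
  ((PySem.List.dedup potential_moves).foldl (fun st direction =>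
      let dv := (pyDIRECTIONS.get? direction).getD (0, 0)
      let score := 5 * (|my_head_pos.1 + dv.1 - closest_food_pos.1| +
                        |my_head_pos.2 + dv.2 - closest_food_pos.2|)
      match st.2 with
      | none => (direction, some score)
      | some bs => if score ≤ bs then (direction, some score) else st)
    ("up", (none : Option Int))).1

-- ===== PRECONDITION & SPEC =====
-- Pre_ excludes move strings outside DIRECTIONS, on which Python A raises KeyError.
def Pre_calculateMoveScore (my_head_pos : Int × Int) (potential_moves : List String) (closest_food_pos : Int × Int) (board : List (String × Int)) : Prop :=
  ∀ m ∈ potential_moves, m = "up" ∨ m = "down" ∨ m = "left" ∨ m = "right"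
instance (my_head_pos : Int × Int) (potential_moves : List String) (closest_food_pos : Int × Int) (board : List (String × Int)) : Decidable (Pre_calculateMoveScore my_head_pos potential_moves closest_food_pos board) := by unfold Pre_calculateMoveScore; infer_instance

def pvWitness_calculateMoveScore : (Int × Int) × List String × (Int × Int) × (List (String × Int)) :=
  ((0, 0), ["up", "left", "up"], (2, 3), [])

def Spec_calculateMoveScore (my_head_pos : Int × Int) (potential_moves : List String) (closest_food_pos : Int × Int) (board : List (String × Int)) (out : String) : Prop := out = calculateMoveScore_alt my_head_pos potential_moves closest_food_pos board
instance (my_head_pos : Int × Int) (potential_moves : List String) (closest_food_pos : Int × Int) (board : List (String × Int)) (out : String) : Decidable (Spec_calculateMoveScore my_head_pos potential_moves closest_food_pos board out) := by unfold Spec_calculateMoveScore; infer_instance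

-- ===== CLAIM (what is proved, stated in full; the proofs are below) =====
def Claim_equal_calculateMoveScore : Prop := ∀ (my_head_pos : Int × Int) (potential_moves : List String) (closest_food_pos : Int × Int) (board : List (String × Int)), Dom_calculateMoveScore my_head_pos potential_moves closest_food_pos board → Pre_calculateMoveScore my_head_pos potential_moves closest_food_pos board → Spec_calculateMoveScore my_head_pos potential_moves closest_food_pos board (calculateMoveScore my_head_pos potential_moves closest_food_pos board)

-- ===== LEMMAS AND PROOFS =====

-- score of a direction (B's score formula)
def pvScore (h food : Int × Int) (dir : String) : Int :=
  let dv := (pyDIRECTIONS.get? dir).getD (0, 0)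
  5 * (|h.1 + dv.1 - food.1| + |h.2 + dv.2 - food.2|)

-- A's per-direction value equals B's
lemma pvScore_eq (h food : Int × Int) (dir : String) :
    pyManhattan (h.1 + ((pyDIRECTIONS.get? dir).getD (0, 0)).1,
                 h.2 + ((pyDIRECTIONS.get? dir).getD (0, 0)).2) food * 5 =
    pvScore h food dir := by
  simp only [pvScore, pyManhattan]; ring

-- a fold of inserts whose value depends only on the key
lemma getD_foldl_insert_const (f : String → Int) (l : List String) (d : PySem.Dict String Int) (k : String) :
    (l.foldl (fun d x => d.insert x (f x)) d).getD k 0 =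
      if k ∈ l then f k else d.getD k 0 := by
  induction l generalizing d with
  | nil => simp
  | cons x t ih =>
      simp only [List.foldl_cons, ih, PySem.Dict.getD_insert, List.mem_cons]
      by_cases h1 : k ∈ t <;> by_cases h2 : k = x <;> simp [h1, h2]

-- running minimum of a nonempty list
def pvMin : List Int → Int
  | [] => 0
  | x :: t => t.foldl min x

lemma pvMin_append_singleton (l : List Int) (y : Int) (hl : l ≠ []) :
    pvMin (l ++ [y]) = min (pvMin l) y := by
  cases l with
  | nil => simp at hl
  | cons x t => simp [pvMin, List.foldl_append]

-- A's selection fold with a fixed target m: keeps the last element with f k = m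
def pvSelA (f : String → Int) (m : Int) (a : String) (ks : List String) : String :=
  ks.foldl (fun acc k => if f k = m then k else acc) a

-- B's running-best fold characterised: over nonempty ks it ends at A's selection at the true minimum
lemma pvB_char (f : String → Int) (ks : List String) (hks : ks ≠ []) :
    ks.foldl (fun st k =>
        match st.2 with
        | none => (k, some (f k))
        | some bs => if f k ≤ bs then (k, some (f k)) else st)
      ("up", (none : Option Int)) =
    (pvSelA f (pvMin (ks.map f)) "up" ks, some (pvMin (ks.map f))) := by
  induction ks using List.reverseRecOn with
  | nil => simp at hks
  | append_singleton ks' k ih =>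
      by_cases hne : ks' = []
      · subst hne; simp [pvSelA, pvMin]
      · have hmapne : ks'.map f ≠ [] := by simpa using hne
        rw [List.foldl_append, ih hne, List.map_append, List.map_cons, List.map_nil,
          pvMin_append_singleton _ _ hmapne]
        simp only [List.foldl_cons, List.foldl_nil]
        by_cases hle : f k ≤ pvMin (ks'.map f)
        · have hm : min (pvMin (ks'.map f)) (f k) = f k := min_eq_right hle
          simp [hle, hm, pvSelA, List.foldl_append]
        · have hmin : min (pvMin (ks'.map f)) (f k) = pvMin (ks'.map f) :=
            min_eq_left (le_of_lt (lt_of_not_ge hle))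
          have hne2 : f k ≠ pvMin (ks'.map f) := fun hh => hle (le_of_eq hh)
          simp [hle, hmin, pvSelA, List.foldl_append, hne2]

-- ===== VERDICT (by name: the statement is the Claim_ definition above) =====
theorem calculateMoveScore_spec : Claim_equal_calculateMoveScore := by
  intro h pm food board _ _
  unfold Spec_calculateMoveScore calculateMoveScore calculateMoveScore_alt
  set f := pvScore h food with hf
  set ks := PySem.List.dedup pm with hks
  -- A's first loop builds a dict whose value at each key is f of the key
  have hd : (pm.foldl (fun d direction =>
      let dv := (pyDIRECTIONS.get? direction).getD (0, 0)
      let potential_pos := (h.1 + dv.1, h.2 + dv.2)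
      let distance_to_closest_food := pyManhattan potential_pos food
      d.insert direction (distance_to_closest_food * 5)) PySem.Dict.empty) =
      pm.foldl (fun d x => d.insert x (f x)) PySem.Dict.empty := by
    apply PySem.List.foldl_congr_mem
    intro acc x _
    simp only [hf, ← pvScore_eq]
  rw [hd]
  set d : PySem.Dict String Int := pm.foldl (fun d x => d.insert x (f x)) PySem.Dict.empty with hdd
  have hkeys : d.keys = ks := by
    rw [hdd, PySem.Dict.keys_foldl_insert]
    simp only [PySem.Dict.keys_empty, PySem.Set.update_nil_left]
    rw [hks, PySem.List.dedup_eq_ofList]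
  have hnodup : d.keys.Nodup := by
    rw [hkeys, hks]; exact PySem.List.nodup_dedup pm
  have hgetD : ∀ k ∈ ks, d.getD k 0 = f k := by
    intro k hk
    have hkpm : k ∈ pm := (PySem.List.mem_dedup pm k).1 (hks ▸ hk)
    rw [hdd, getD_foldl_insert_const]
    simp [hkpm]
  have hvals : d.values = ks.map f := by
    rw [PySem.Dict.values_eq_map_keys d hnodup 0, hkeys]
    exact List.map_congr_left hgetD
  show (d.keys.foldl (fun next_move key =>
      if d.getD key 0 = (PySem.List.min? d.values (fun v => v)).getD 0 then key
      else next_move) "up") =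
    (ks.foldl (fun st k =>
        match st.2 with
        | none => (k, some (f k))
        | some bs => if f k ≤ bs then (k, some (f k)) else st)
      ("up", (none : Option Int))).1
  rw [hkeys, hvals]
  cases hcase : ks with
  | nil => simp
  | cons k0 t =>
      have hne : ks ≠ [] := by simp [hcase]
      rw [← hcase]
      have hmin : PySem.List.min? (ks.map f) (fun v => v) = some (pvMin (ks.map f)) := by
        rw [hcase]; simp only [List.map_cons]
        rw [PySem.List.min?_id_cons]; rfl
      rw [hmin]
      have hA : ks.foldl (fun next_move key =>
          if d.getD key 0 = (some (pvMin (ks.map f))).getD 0 then key else next_move) "up" =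
          pvSelA f (pvMin (ks.map f)) "up" ks := by
        apply PySem.List.foldl_congr_mem
        intro acc x hx
        rw [hgetD x hx]; rfl
      rw [hA, pvB_char f ks hne]
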